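-- pv_equiv track=rewrite | github.com/baansalravneet/LeetCode-Solutions | 3143. Maximum Points Inside the Square.py | maxPointsInsideSquare
-- ===== SOURCE A (Python) =====
-- from typing import List
--
-- def maxPointsInsideSquare(points: List[List[int]], s: str) -> int:
--     p_list = []
--     for i in range(len(points)):
--         p_list.append(Point(points[i][0], points[i][1], s[i]))
--     p_list.sort(key=lambda x: x.distance())
--     set_p = set()
--     answer = 0
--     i = 0
--     while i < len(p_list):
--         distance = p_list[i].distance()
--         subset = set()
--         while i < len(p_list) and p_list[i].distance() == distance:
--             if p_list[i].tag in set_p or p_list[i].tag in subset: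
--                 return answer
--             subset.add(p_list[i].tag)
--             i += 1
--         answer = i
--         set_p |= subset
--     return answer
--
-- class Point:
--     def __init__(self, x, y, tag):
--         self.x = x
--         self.y = y
--         self.tag = tag
--     def distance(self):
--         return max(abs(self.x), abs(self.y))
-- ===== SOURCE B (Python) =====
-- from typing import List
--
-- def maxPointsInsideSquare(points: List[List[int]], s: str) -> int:
--     # Single unsorted pass: best[tag] = smallest distance seen for tag; thr = min
--     # over duplicate-tag pairs of the larger distance (= min over tags of their
--     # second-smallest distance).  Answer = points strictly below thr.
--     best = {}
--     thr = None
--     dists = []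
--     for p, tag in zip(points, s):
--         d = max(abs(p[0]), abs(p[1]))
--         dists.append(d)
--         m = best.get(tag)
--         if m is None:
--             best[tag] = d
--         else:
--             c = m if m > d else d
--             if thr is None or c < thr:
--                 thr = c
--             if d < m:
--                 best[tag] = d
--     if thr is None:
--         return len(points)
--     return sum(1 for d in dists if d < thr)
-- ===== Notes on version B (the rewrite author's own statement) =====
-- stated objective: alternative
-- what changed: Instead of sorting by Chebyshev distance and scanning distance-groups with seen-tag sets, B makes one unsorted pass keeping per-tag minimum distance and a running threshold (the smallest larger-distance of any duplicate-tag pair), then counts points strictly below that threshold; it trades A's O(n log n) sort for a linear pass, though CPython's C-implemented sort keeps A as fast in practice.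
import Mathlib
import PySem

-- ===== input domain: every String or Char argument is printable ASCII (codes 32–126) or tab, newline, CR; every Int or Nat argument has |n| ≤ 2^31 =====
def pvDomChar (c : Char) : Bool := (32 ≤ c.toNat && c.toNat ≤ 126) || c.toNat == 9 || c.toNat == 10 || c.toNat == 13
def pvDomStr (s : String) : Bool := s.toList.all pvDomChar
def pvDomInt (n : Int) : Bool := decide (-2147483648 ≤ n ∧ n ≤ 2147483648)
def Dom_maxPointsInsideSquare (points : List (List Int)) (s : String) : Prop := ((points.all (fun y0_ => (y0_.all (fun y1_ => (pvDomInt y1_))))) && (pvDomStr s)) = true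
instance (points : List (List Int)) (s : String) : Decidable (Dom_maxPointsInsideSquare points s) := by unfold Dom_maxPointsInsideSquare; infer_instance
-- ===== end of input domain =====

-- B replaces A's sort-by-distance group scan by a single unsorted pass keeping per-tag minimum
-- distance and the running duplicate threshold, then counts points below it (objective: alternative).


-- ===== PORT A =====
-- Point(x, y, tag).distance() = max(|x|, |y|)
def pvDist (p : Int × Int × Char) : Int := max |p.1| |p.2.1|

-- Point(points[i][0], points[i][1], s[i]); Pre_ guarantees all three indices are in range,
-- so the getD defaults are never read.
def pvPointA (points : List (List Int)) (cs : List Char) (i : Nat) : Int × Int × Char :=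
  ((points.getD i []).getD 0 0, (points.getD i []).getD 1 0, cs.getD i ' ')

-- inner while loop: consumes the prefix with distance == d, checking tags; none = early `return answer`
def pvInnerA : List (Int × Int × Char) → Int → Int → PySem.Set Char → PySem.Set Char →
    Option (Int × List (Int × Int × Char) × PySem.Set Char)
  | [], i, _, _, subset => some (i, [], subset)
  | p :: r, i, d, setp, subset =>
    if pvDist p = d then
      if p.2.2 ∈ setp ∨ p.2.2 ∈ subset then none
      else pvInnerA r (i + 1) d setp (PySem.Set.add subset p.2.2)
    else some (i, p :: r, subset)

theorem pvInnerA_le : ∀ (l : List (Int × Int × Char)) i d setp subset i' l' ss',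
    pvInnerA l i d setp subset = some (i', l', ss') → l'.length ≤ l.length := by
  intro l
  induction l with
  | nil =>
    intro i d setp subset i' l' ss' h
    simp only [pvInnerA, Option.some.injEq, Prod.mk.injEq] at h
    simp [← h.2.1]
  | cons p r ih =>
    intro i d setp subset i' l' ss' h
    simp only [pvInnerA] at h
    split at h
    · split at h
      · exact absurd h (by simp)
      · exact Nat.le_succ_of_le (ih _ _ _ _ _ _ _ h)
    · simp only [Option.some.injEq, Prod.mk.injEq] at h
      simp [← h.2.1]

theorem pvInnerA_cons_le {p r i setp i' l' ss'} :
    pvInnerA (p :: r) i (pvDist p) setp PySem.Set.empty = some (i', l', ss') →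
    l'.length ≤ r.length := by
  intro h
  rw [pvInnerA, if_pos rfl] at h
  split at h
  · exact absurd h (by simp)
  · exact pvInnerA_le _ _ _ _ _ _ _ _ h

-- outer while loop
def pvOuterA (l : List (Int × Int × Char)) (i : Int) (setp : PySem.Set Char) (ans : Int) : Int :=
  match l with
  | [] => ans
  | p :: r =>
    match hin : pvInnerA (p :: r) i (pvDist p) setp PySem.Set.empty with
    | none => ans
    | some (i', l', subset) => pvOuterA l' i' (PySem.Set.union setp subset) i'
termination_by l.length
decreasing_by
  exact Nat.lt_succ_of_le (pvInnerA_cons_le hin)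

def maxPointsInsideSquare (points : List (List Int)) (s : String) : Int :=
  let plist := (List.range points.length).map (pvPointA points s.toList)
  let slist := PySem.List.sorted plist pvDist false
  pvOuterA slist 0 PySem.Set.empty 0

-- ===== PORT B =====
-- one fold step: state = (best : tag → min distance so far, thr : running threshold, dists)
def pvStepB (st : PySem.Dict Char Int × Option Int × List Int) (pt : List Int × Char) :
    PySem.Dict Char Int × Option Int × List Int :=
  let d := max |pt.1.getD 0 0| |pt.1.getD 1 0|
  let dists := st.2.2 ++ [d]
  match st.1.get? pt.2 with
  | none => (st.1.insert pt.2 d, st.2.1, dists)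
  | some m =>
    let c := if m > d then m else d
    let thr : Option Int :=
      match st.2.1 with
      | none => some c
      | some t => if c < t then some c else some t
    (if d < m then st.1.insert pt.2 d else st.1, thr, dists)

def maxPointsInsideSquare_alt (points : List (List Int)) (s : String) : Int :=
  let st := (points.zip s.toList).foldl pvStepB (PySem.Dict.empty, none, [])
  match st.2.1 with
  | none => (points.length : Int)
  | some t => ((st.2.2.filter (fun d => d < t)).length : Int)

-- ===== PRECONDITION & SPEC =====
-- A raises IndexError when some row has fewer than 2 coordinates or s is shorter than points.
def Pre_maxPointsInsideSquare (points : List (List Int)) (s : String) : Prop :=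
  (∀ p ∈ points, 2 ≤ p.length) ∧ points.length ≤ s.toList.length
instance (points : List (List Int)) (s : String) : Decidable (Pre_maxPointsInsideSquare points s) := by
  unfold Pre_maxPointsInsideSquare; infer_instance

def pvWitness_maxPointsInsideSquare : List (List Int) × String := ([[1, 2], [-3, 0]], "ab")

def Spec_maxPointsInsideSquare (points : List (List Int)) (s : String) (out : Int) : Prop := out = maxPointsInsideSquare_alt points s
instance (points : List (List Int)) (s : String) (out : Int) : Decidable (Spec_maxPointsInsideSquare points s out) := by unfold Spec_maxPointsInsideSquare; infer_instance

-- ===== CLAIM (what is proved, stated in full; the proofs are below) =====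
def Claim_equal_maxPointsInsideSquare : Prop := ∀ (points : List (List Int)) (s : String), Dom_maxPointsInsideSquare points s → Pre_maxPointsInsideSquare points s → Spec_maxPointsInsideSquare points s (maxPointsInsideSquare points s)

-- ===== LEMMAS AND PROOFS =====

-- ---- generic Option-min machinery ----
def pvOMin : Option Int → Option Int → Option Int
  | none, b => b
  | some a, none => some a
  | some a, some b => some (min a b)

theorem pvOMin_none_right (a : Option Int) : pvOMin a none = a := by cases a <;> rfl

theorem pvOMin_comm (a b : Option Int) : pvOMin a b = pvOMin b a := by
  cases a <;> cases b <;> simp [pvOMin, min_comm]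

theorem pvOMin_assoc (a b c : Option Int) : pvOMin (pvOMin a b) c = pvOMin a (pvOMin b c) := by
  cases a <;> cases b <;> cases c <;> simp [pvOMin, min_assoc]

theorem pvOMin_left_comm (a b c : Option Int) : pvOMin a (pvOMin b c) = pvOMin b (pvOMin a c) := by
  rw [← pvOMin_assoc, pvOMin_comm a b, pvOMin_assoc]

theorem pvOMin_some_left_of_le {x : Option Int} {a : Int}
    (h : ∀ v, x = some v → a ≤ v) : pvOMin (some a) x = some a := by
  cases x with
  | none => rfl
  | some v => simp [pvOMin, min_eq_left (h v rfl)]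

theorem pvOMin_lb {a b : Option Int} {c : Int}
    (ha : ∀ x, a = some x → c ≤ x) (hb : ∀ x, b = some x → c ≤ x) :
    ∀ v, pvOMin a b = some v → c ≤ v := by
  cases a <;> cases b <;> intro v hv <;> simp only [pvOMin, Option.some.injEq] at hv
  · exact absurd hv (by simp)
  · exact hb v (by rw [hv])
  · exact ha v (by rw [hv])
  · subst hv; exact le_min (ha _ rfl) (hb _ rfl)

theorem pvFoldlMinMin (u : List Int) : ∀ x y, u.foldl min (min x y) = min x (u.foldl min y) := by
  induction u with
  | nil => intro x y; rfl
  | cons c u ih =>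
    intro x y
    simp only [List.foldl_cons, min_assoc]
    exact ih x (min y c)

theorem pvMin?_cons (x : Int) (L : List Int) : (x :: L).min? = pvOMin (some x) L.min? := by
  cases L with
  | nil => rfl
  | cons b u =>
    simp only [List.min?_cons', pvOMin, List.foldl_cons]
    rw [pvFoldlMinMin]

theorem pvMin?_append (l₁ l₂ : List Int) : (l₁ ++ l₂).min? = pvOMin l₁.min? l₂.min? := by
  induction l₁ with
  | nil => simp [pvOMin]
  | cons a t ih => simp only [List.cons_append, pvMin?_cons, ih, pvOMin_assoc]

theorem pvMin?_perm {l₁ l₂ : List Int} (h : l₁.Perm l₂) : l₁.min? = l₂.min? := by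
  cases h1 : l₁.min? with
  | none =>
    rw [List.min?_eq_none_iff] at h1
    subst h1
    exact (List.min?_eq_none_iff.2 h.symm.eq_nil).symm
  | some a =>
    obtain ⟨hm, hb⟩ := List.min?_eq_some_iff.1 h1
    exact (List.min?_eq_some_iff.2 ⟨h.subset hm, fun b hb2 => hb b (h.symm.subset hb2)⟩).symm

theorem pvMin?_cons_of_le {a : Int} {L : List Int} (h : ∀ x ∈ L, a ≤ x) :
    (a :: L).min? = some a := by
  refine List.min?_eq_some_iff.2 ⟨List.mem_cons_self, ?_⟩
  intro b hb
  rcases List.mem_cons.1 hb with h1 | h1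
  · exact h1 ▸ le_refl a
  · exact h b h1

theorem pvMin?_map_max (L : List Int) (d : Int) :
    (L.map (fun y => max d y)).min? = L.min?.map (fun m => max d m) := by
  induction L with
  | nil => rfl
  | cons a t ih =>
    simp only [List.map_cons, pvMin?_cons, ih]
    cases t.min? with
    | none => rfl
    | some m => simp [pvOMin, max_min_distrib_left]

-- ---- spec-side notions: threshold over duplicate-tag pairs ----
def pvProj (p : Int × Int × Char) : Int × Char := (pvDist p, p.2.2)

def pvCand (d : Int) (t : Char) (l : List (Int × Char)) : Option Int :=
  ((l.filter (fun q => q.2 == t)).map (fun q => max d q.1)).min?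

def pvThr : List (Int × Char) → Option Int
  | [] => none
  | q :: r => pvOMin (pvCand q.1 q.2 r) (pvThr r)

def pvTagMin (t : Char) (l : List (Int × Char)) : Option Int :=
  ((l.filter (fun q => q.2 == t)).map (·.1)).min?

theorem pvCand_cons (d : Int) (t : Char) (q : Int × Char) (r : List (Int × Char)) :
    pvCand d t (q :: r) = if q.2 = t then pvOMin (some (max d q.1)) (pvCand d t r)
      else pvCand d t r := by
  simp only [pvCand, List.filter_cons]
  by_cases h : q.2 = t
  · rw [if_pos h]
    simp only [h, BEq.rfl, if_true, List.map_cons]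
    rw [pvMin?_cons]
  · simp [h]

theorem pvCand_perm {r₁ r₂ : List (Int × Char)} (d : Int) (t : Char) (h : r₁.Perm r₂) :
    pvCand d t r₁ = pvCand d t r₂ :=
  pvMin?_perm ((h.filter _).map _)

theorem pvThr_perm {l₁ l₂ : List (Int × Char)} (h : l₁.Perm l₂) : pvThr l₁ = pvThr l₂ := by
  induction h with
  | nil => rfl
  | cons x _ ih =>
    rename_i l₁' l₂' hp
    simp only [pvThr, ih, pvCand_perm _ _ hp]
  | swap x y l =>
    simp only [pvThr, pvCand_cons]
    by_cases h : x.2 = y.2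
    · rw [if_pos h, if_pos h.symm, max_comm y.1 x.1, pvOMin_assoc, pvOMin_assoc]
      congr 1
      exact pvOMin_left_comm _ _ _
    · rw [if_neg h, if_neg (fun hh => h hh.symm)]
      exact pvOMin_left_comm _ _ _
  | trans _ _ ih1 ih2 => exact ih1.trans ih2

theorem pvCand_lb {r : List (Int × Char)} {c d : Int} {t : Char}
    (h : ∀ q ∈ r, c ≤ q.1) : ∀ v, pvCand d t r = some v → c ≤ v := by
  intro v hv
  obtain ⟨hm, -⟩ := List.min?_eq_some_iff.1 hv
  obtain ⟨q, hq, rfl⟩ := List.mem_map.1 hm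
  exact le_trans (h q (List.mem_of_mem_filter hq)) (le_max_right _ _)

theorem pvThr_lb : ∀ (l : List (Int × Char)) (c : Int), (∀ q ∈ l, c ≤ q.1) →
    ∀ v, pvThr l = some v → c ≤ v := by
  intro l
  induction l with
  | nil => intro c _ v hv; simp [pvThr] at hv
  | cons q r ih =>
    intro c h v hv
    exact pvOMin_lb (pvCand_lb (fun x hx => h x (List.mem_cons_of_mem _ hx)))
      (ih c (fun x hx => h x (List.mem_cons_of_mem _ hx))) v hv

-- ---- first-duplicate scan (what A's grouped scan computes on the sorted list) ----
def pvFb : List Char → List (Int × Char) → Option Int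
  | _, [] => none
  | seen, q :: r => if q.2 ∈ seen then some q.1 else pvFb (q.2 :: seen) r

theorem pvFb_congr : ∀ (l : List (Int × Char)) {s₁ s₂ : List Char},
    (∀ c, c ∈ s₁ ↔ c ∈ s₂) → pvFb s₁ l = pvFb s₂ l := by
  intro l
  induction l with
  | nil => intro s₁ s₂ _; rfl
  | cons q r ih =>
    intro s₁ s₂ h
    simp only [pvFb]
    by_cases hq : q.2 ∈ s₁
    · rw [if_pos hq, if_pos ((h q.2).1 hq)]
    · rw [if_neg hq, if_neg (fun hh => hq ((h q.2).2 hh))]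
      exact ih (fun c => by simp [List.mem_cons, h c])

theorem pvFb_append : ∀ (a b : List (Int × Char)) (seen : List Char),
    pvFb seen (a ++ b) = match pvFb seen a with
      | some x => some x
      | none => pvFb ((a.map (·.2)).reverse ++ seen) b := by
  intro a
  induction a with
  | nil => intro b seen; rfl
  | cons q r ih =>
    intro b seen
    simp only [List.cons_append, pvFb]
    by_cases hq : q.2 ∈ seen
    · simp [hq]
    · rw [if_neg hq, if_neg hq, ih b (q.2 :: seen)]
      simp only [List.map_cons, List.reverse_cons, List.append_assoc, List.singleton_append]

theorem pvFb_some_mem : ∀ (l : List (Int × Char)) (seen : List Char) (x : Int),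
    pvFb seen l = some x → x ∈ l.map (·.1) := by
  intro l
  induction l with
  | nil => intro seen x h; simp [pvFb] at h
  | cons q r ih =>
    intro seen x h
    simp only [pvFb] at h
    split at h
    · simp at h; simp [h]
    · exact List.mem_cons_of_mem _ (ih _ _ h)

-- min over an or-filter splits (disjointness not even needed, but we have it)
theorem pvMinD_filter_or (r : List (Int × Char)) (p q : (Int × Char) → Prop)
    [DecidablePred p] [DecidablePred q] (hdisj : ∀ x, ¬ (p x ∧ q x)) :
    ((r.filter (fun x => decide (p x ∨ q x))).map (·.1)).min? =
      pvOMin ((r.filter (fun x => decide (p x))).map (·.1)).min?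
            ((r.filter (fun x => decide (q x))).map (·.1)).min? := by
  simp only [Bool.decide_or]
  induction r with
  | nil => rfl
  | cons x t ih =>
    by_cases hp : p x
    · have hq : ¬ q x := fun hq => hdisj x ⟨hp, hq⟩
      simp only [List.filter_cons, hp, hq, decide_true, decide_false, Bool.true_or,
        reduceIte, Bool.false_eq_true, if_false, List.map_cons]
      rw [pvMin?_cons, pvMin?_cons, ih, pvOMin_assoc]
    · by_cases hq : q x
      · simp only [List.filter_cons, hp, hq, decide_true, decide_false, Bool.false_or,
          reduceIte, Bool.false_eq_true, if_false, List.map_cons]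
        rw [pvMin?_cons, pvMin?_cons, ih]
        exact pvOMin_left_comm _ _ _
      · simp only [List.filter_cons, hp, hq, decide_false, Bool.false_or,
          Bool.false_eq_true, if_false]
        exact ih

-- first-duplicate on a distance-sorted list = the pair threshold
theorem pvFb_eq_thr : ∀ (m : List (Int × Char)), m.Pairwise (fun a b => a.1 ≤ b.1) →
    ∀ seen : List Char,
      pvFb seen m = pvOMin ((m.filter (fun q => decide (q.2 ∈ seen))).map (·.1)).min? (pvThr m) := by
  intro m
  induction m with
  | nil => intro _ seen; rfl
  | cons q r ih =>
    intro hp seen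
    obtain ⟨rel, hr⟩ := List.pairwise_cons.1 hp
    by_cases hq : q.2 ∈ seen
    · -- first offending element: everything else is at distance ≥ q.1
      rw [show pvFb seen (q :: r) = some q.1 by simp [pvFb, hq]]
      have hflt : ∀ x ∈ (r.filter (fun q' => decide (q'.2 ∈ seen))).map (·.1), q.1 ≤ x := by
        intro x hx
        obtain ⟨y, hy, rfl⟩ := List.mem_map.1 hx
        exact rel y (List.mem_of_mem_filter hy)
      rw [show (((q :: r).filter (fun q' => decide (q'.2 ∈ seen))).map (·.1)).min? = some q.1 by
        simp only [List.filter_cons, hq, decide_true, if_true, List.map_cons]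
        exact pvMin?_cons_of_le hflt]
      symm
      apply pvOMin_some_left_of_le
      intro v hv
      simp only [pvThr] at hv
      exact pvOMin_lb (pvCand_lb rel) (pvThr_lb r q.1 rel) v hv
    · rw [show pvFb seen (q :: r) = pvFb (q.2 :: seen) r by simp [pvFb, hq]]
      rw [ih hr (q.2 :: seen)]
      have hsplit := pvMinD_filter_or r (fun x => x.2 = q.2) (fun x => x.2 ∈ seen)
        (fun x hx => hq (hx.1 ▸ hx.2))
      rw [show (r.filter (fun q' => decide (q'.2 ∈ q.2 :: seen))) =
            (r.filter (fun x => decide (x.2 = q.2 ∨ x.2 ∈ seen))) by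
        apply List.filter_congr; intro x _; simp [List.mem_cons]]
      rw [hsplit]
      have hcand : pvCand q.1 q.2 r = ((r.filter (fun x => decide (x.2 = q.2))).map (·.1)).min? := by
        unfold pvCand
        rw [show (r.filter (fun q' => q'.2 == q.2)) = (r.filter (fun x => decide (x.2 = q.2))) by
          apply List.filter_congr; intro x _
          rw [Bool.eq_iff_iff]; simp [beq_iff_eq]]
        apply congrArg
        apply List.map_congr_left
        intro y hy
        exact max_eq_right (rel y (List.mem_of_mem_filter hy))
      rw [show ((q :: r).filter (fun q' => decide (q'.2 ∈ seen))) =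
            (r.filter (fun q' => decide (q'.2 ∈ seen))) by simp [hq]]
      rw [show pvThr (q :: r) = pvOMin (pvCand q.1 q.2 r) (pvThr r) from rfl, hcand]
      rw [pvOMin_comm (((r.filter (fun x => decide (x.2 = q.2))).map (·.1)).min?), pvOMin_assoc]

-- ---- inner-loop characterisation ----
theorem pvInnerA_eq : ∀ (l : List (Int × Int × Char)) (d : Int) (i : Int)
    (setp subset : PySem.Set Char),
    pvInnerA l i d setp subset =
      match pvFb (setp ++ subset) ((l.takeWhile (fun p => pvDist p == d)).map pvProj) with
      | some _ => none
      | none => some (i + ((l.takeWhile (fun p => pvDist p == d)).length : Int),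
                      l.dropWhile (fun p => pvDist p == d),
                      (l.takeWhile (fun p => pvDist p == d)).foldl
                        (fun ss p => PySem.Set.add ss p.2.2) subset) := by
  intro l
  induction l with
  | nil =>
    intro d i setp subset
    simp [pvInnerA, pvFb]
  | cons p r ih =>
    intro d i setp subset
    by_cases hd : pvDist p = d
    · rw [show (p :: r).takeWhile (fun p => pvDist p == d) =
            p :: r.takeWhile (fun p => pvDist p == d) by simp [hd]]
      rw [show (p :: r).dropWhile (fun p => pvDist p == d) =
            r.dropWhile (fun p => pvDist p == d) by simp [hd]]
      rw [show pvInnerA (p :: r) i d setp subset =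
            (if p.2.2 ∈ setp ∨ p.2.2 ∈ subset then none
             else pvInnerA r (i + 1) d setp (PySem.Set.add subset p.2.2)) by
        simp [pvInnerA, hd]]
      by_cases hmem : p.2.2 ∈ setp ∨ p.2.2 ∈ subset
      · rw [if_pos hmem]
        rw [show pvFb (setp ++ subset) ((p :: r.takeWhile (fun p => pvDist p == d)).map pvProj) =
              some (pvProj p).1 by
          simp only [List.map_cons, pvFb]
          rw [if_pos (by simpa [pvProj, List.mem_append] using hmem)]]
      · rw [if_neg hmem, ih d (i + 1) setp (PySem.Set.add subset p.2.2)]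
        have hseen : ∀ c : Char, c ∈ setp ++ PySem.Set.add subset p.2.2 ↔
            c ∈ (pvProj p).2 :: (setp ++ subset) := by
          intro c
          simp only [List.mem_append, PySem.Set.mem_add, List.mem_cons, pvProj]
          tauto
        rw [pvFb_congr _ hseen]
        rw [show pvFb (setp ++ subset) ((p :: r.takeWhile (fun p => pvDist p == d)).map pvProj) =
              pvFb ((pvProj p).2 :: (setp ++ subset)) ((r.takeWhile (fun p => pvDist p == d)).map pvProj) by
          simp only [List.map_cons, pvFb]
          rw [if_neg (by simpa [pvProj, List.mem_append] using hmem)]]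
        cases pvFb ((pvProj p).2 :: (setp ++ subset)) ((r.takeWhile (fun p => pvDist p == d)).map pvProj) with
        | some x => rfl
        | none =>
          simp only [List.length_cons, List.foldl_cons, Option.some.injEq, Prod.mk.injEq]
          exact ⟨by push_cast; ring, trivial⟩
    · rw [show (p :: r).takeWhile (fun p => pvDist p == d) = [] by simp [hd]]
      rw [show (p :: r).dropWhile (fun p => pvDist p == d) = p :: r by simp [hd]]
      rw [show pvInnerA (p :: r) i d setp subset = some (i, p :: r, subset) by simp [pvInnerA, hd]]
      simp [pvFb]

theorem pvMemFoldlAdd : ∀ (l : List (Int × Int × Char)) (ss : PySem.Set Char) (c : Char),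
    c ∈ l.foldl (fun ss p => PySem.Set.add ss p.2.2) ss ↔ c ∈ ss ∨ c ∈ l.map (·.2.2) := by
  intro l
  induction l with
  | nil => simp
  | cons p r ih =>
    intro ss c
    simp only [List.foldl_cons, ih, PySem.Set.mem_add, List.map_cons, List.mem_cons]
    tauto

-- ---- outer-loop characterisation ----
theorem pvOuterA_eq : ∀ (n : Nat) (l : List (Int × Int × Char)), l.length = n →
    l.Pairwise (fun a b => pvDist a ≤ pvDist b) → ∀ (i : Int) (setp : PySem.Set Char),
    pvOuterA l i setp i = i +
      (match pvFb setp (l.map pvProj) with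
       | none => (l.length : Int)
       | some d => ((l.map pvProj).countP (fun q => decide (q.1 < d)) : Int)) := by
  intro n
  induction n using Nat.strong_induction_on with
  | _ n IH =>
    intro l hn hp i setp
    cases l with
    | nil => simp [pvOuterA, pvFb]
    | cons p r =>
      obtain ⟨rel, hr⟩ := List.pairwise_cons.1 hp
      set d0 := pvDist p with hd0
      set tw := (p :: r).takeWhile (fun q => pvDist q == d0) with htw
      set dw := (p :: r).dropWhile (fun q => pvDist q == d0) with hdw
      have hsplit : tw ++ dw = p :: r := List.takeWhile_append_dropWhile
      have htwcons : tw = p :: r.takeWhile (fun q => pvDist q == d0) := by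
        rw [htw, List.takeWhile_cons, if_pos (show (pvDist p == d0) = true by simp [hd0])]
      have htwd : ∀ q ∈ tw, pvDist q = d0 := fun q hq => by
        simpa using List.mem_takeWhile_imp hq
      have hmem : ∀ q ∈ (p :: r), d0 ≤ pvDist q := by
        intro q hq
        rcases List.mem_cons.1 hq with rfl | hq
        · exact le_refl _
        · exact rel q hq
      have hinner := pvInnerA_eq (p :: r) d0 i setp PySem.Set.empty
      rw [show (setp ++ PySem.Set.empty : List Char) = setp from List.append_nil _] at hinner
      have hfbfull := pvFb_append (tw.map pvProj) (dw.map pvProj) setp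
      rw [show tw.map pvProj ++ dw.map pvProj = (p :: r).map pvProj by
        rw [← List.map_append, hsplit]] at hfbfull
      cases hfb : pvFb setp (tw.map pvProj) with
      | some x =>
        -- duplicate inside the first distance group: A returns the incoming answer
        have hxd : x = d0 := by
          have hx := pvFb_some_mem _ _ _ hfb
          simp only [List.map_map, List.mem_map] at hx
          obtain ⟨q, hq, hqx⟩ := hx
          rw [← hqx]
          exact htwd q hq
        rw [hfb] at hfbfull hinner
        simp only at hfbfull hinner
        rw [pvOuterA]
        split
        · have hcnt : ((p :: r).map pvProj).countP (fun q => decide (q.1 < d0)) = 0 := by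
            refine List.countP_eq_zero.mpr ?_
            intro q hq
            obtain ⟨y, hy, rfl⟩ := List.mem_map.1 hq
            simp only [pvProj, decide_eq_true_eq, not_lt]
            exact hmem y hy
          rw [hfbfull, hxd]
          simp only [hcnt]
          simp
        · rename_i i' l' ss heq
          rw [hinner] at heq
          exact absurd heq (by simp)
      | none =>
        rw [hfb] at hfbfull hinner
        simp only at hfbfull hinner
        have htwlen : 0 < tw.length := by rw [htwcons]; simp
        have hlen : tw.length + dw.length = (p :: r).length := by
          rw [← hsplit]; simp
        have hdwlt : dw.length < n := by omega
        have hdwp : dw.Pairwise (fun a b => pvDist a ≤ pvDist b) :=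
          hp.sublist (List.dropWhile_sublist _)
        have hdwgt : ∀ y ∈ dw, d0 < pvDist y := by
          cases hdweq : dw with
          | nil => intro y hy; simp at hy
          | cons h0 t0 =>
            have hh0 : (fun q => pvDist q == d0) h0 = false := by
              have := List.head?_dropWhile_not (fun q => pvDist q == d0) (p :: r)
              rw [← hdw, hdweq] at this
              simpa using this
            have hh0ne : pvDist h0 ≠ d0 := by simpa using hh0
            have hh0mem : h0 ∈ (p :: r) := (List.dropWhile_sublist _).mem (by rw [← hdw, hdweq]; simp)
            have hh0gt : d0 < pvDist h0 := lt_of_le_of_ne (hmem h0 hh0mem) (Ne.symm hh0ne)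
            intro y hy
            rcases List.mem_cons.1 hy with rfl | hy
            · exact hh0gt
            · have : pvDist h0 ≤ pvDist y := by
                rw [hdweq] at hdwp
                exact (List.pairwise_cons.1 hdwp).1 y hy
              exact lt_of_lt_of_le hh0gt this
        rw [pvOuterA]
        split
        · rename_i heq
          rw [hinner] at heq; exact absurd heq (by simp)
        · rename_i i' l' ss heq
          rw [hinner] at heq
          have heqs := Option.some.inj heq
          have h1 : i + (tw.length : Int) = i' := congrArg Prod.fst heqs
          have h2 : dw = l' := congrArg (fun x => x.2.1) heqs
          have h3 : tw.foldl (fun ss p => PySem.Set.add ss p.2.2) PySem.Set.empty = ss :=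
            congrArg (fun x => x.2.2) heqs
          subst h1; subst h2; subst h3
          rw [IH dw.length hdwlt dw rfl hdwp (i + (tw.length : Int)) _]
          rw [hfbfull]
          have hseen : ∀ c : Char, c ∈ ((tw.map pvProj).map (fun x => x.2)).reverse ++ setp ↔
              c ∈ PySem.Set.union setp
                (tw.foldl (fun ss p => PySem.Set.add ss p.2.2) PySem.Set.empty) := by
            intro c
            simp only [List.mem_append, List.mem_reverse, List.map_map, List.mem_map,
              PySem.Set.mem_union, pvMemFoldlAdd, pvProj, Function.comp, PySem.Set.empty,
              List.not_mem_nil, false_or]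
            exact or_comm
          rw [pvFb_congr _ hseen]
          cases hfb2 : pvFb (PySem.Set.union setp
              (tw.foldl (fun ss p => PySem.Set.add ss p.2.2) PySem.Set.empty)) (dw.map pvProj) with
          | none =>
            dsimp only
            omega
          | some d' =>
            have hd'gt : d0 < d' := by
              have hx := pvFb_some_mem _ _ _ hfb2
              simp only [List.map_map, List.mem_map, Function.comp] at hx
              obtain ⟨y, hy, hyd⟩ := hx
              rw [← hyd]
              exact hdwgt y hy
            dsimp only
            rw [show (p :: r).map pvProj = tw.map pvProj ++ dw.map pvProj by
              rw [← List.map_append, hsplit]]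
            rw [List.countP_append]
            have hc1 : (tw.map pvProj).countP (fun q => decide (q.1 < d')) = tw.length := by
              have hall : ∀ q ∈ tw.map pvProj, (decide (q.1 < d')) = true := by
                intro q hq
                obtain ⟨y, hy, rfl⟩ := List.mem_map.1 hq
                simp only [pvProj, decide_eq_true_eq]
                rw [htwd y hy]
                exact hd'gt
              have := List.countP_eq_length.mpr hall
              rw [List.length_map] at this
              exact this
            rw [hc1]
            push_cast
            ring

-- ---- B-side invariant ----
def pvDOf (l : List Int) : Int := max |l.getD 0 0| |l.getD 1 0|

def pvPairs (xs : List (List Int × Char)) : List (Int × Char) :=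
  xs.map (fun pt => (pvDOf pt.1, pt.2))

theorem pvTagMin_append (t : Char) (l₁ l₂ : List (Int × Char)) :
    pvTagMin t (l₁ ++ l₂) = pvOMin (pvTagMin t l₁) (pvTagMin t l₂) := by
  simp only [pvTagMin, List.filter_append, List.map_append, pvMin?_append]

theorem pvCand_eq_tagMin (d : Int) (tg : Char) (xs : List (Int × Char)) :
    pvCand d tg xs = (pvTagMin tg xs).map (fun m => max d m) := by
  unfold pvCand pvTagMin
  rw [show (xs.filter (fun q => q.2 == tg)).map (fun q => max d q.1) =
        ((xs.filter (fun q => q.2 == tg)).map (·.1)).map (fun y => max d y) by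
    simp [List.map_map]]
  exact pvMin?_map_max _ d

theorem pvThr_snoc (xs : List (Int × Char)) (d : Int) (tg : Char) :
    pvThr (xs ++ [(d, tg)]) =
      pvOMin ((pvTagMin tg xs).map (fun m => max d m)) (pvThr xs) := by
  rw [pvThr_perm (List.perm_append_singleton (d, tg) xs)]
  rw [show pvThr ((d, tg) :: xs) = pvOMin (pvCand d tg xs) (pvThr xs) from rfl]
  rw [pvCand_eq_tagMin]

theorem pvTagMin_singleton (t tg : Char) (d : Int) :
    pvTagMin t [(d, tg)] = if tg = t then some d else none := by
  by_cases h : tg = t <;> simp [pvTagMin, h]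

theorem pvFoldB : ∀ xs : List (List Int × Char),
    (xs.foldl pvStepB (PySem.Dict.empty, none, [])).2.2 = (pvPairs xs).map (·.1) ∧
    (xs.foldl pvStepB (PySem.Dict.empty, none, [])).2.1 = pvThr (pvPairs xs) ∧
    ∀ t : Char, (xs.foldl pvStepB (PySem.Dict.empty, none, [])).1.get? t = pvTagMin t (pvPairs xs) := by
  intro xs
  induction xs using List.reverseRecOn with
  | nil =>
    refine ⟨rfl, rfl, ?_⟩
    intro t
    simp [pvPairs, pvTagMin, PySem.Dict.get?_empty]
  | append_singleton xs a IH =>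
    obtain ⟨IH1, IH2, IH3⟩ := IH
    rw [List.foldl_append]
    have hpp : pvPairs (xs ++ [a]) = pvPairs xs ++ [(pvDOf a.1, a.2)] := by
      simp [pvPairs]
    rw [hpp]
    set st := xs.foldl pvStepB (PySem.Dict.empty, none, []) with hst
    have hd : (max |a.1.getD 0 0| |a.1.getD 1 0|) = pvDOf a.1 := rfl
    rw [show List.foldl pvStepB st [a] = pvStepB st a from rfl]
    unfold pvStepB
    rw [IH3 a.2]
    cases hm : pvTagMin a.2 (pvPairs xs) with
    | none =>
      refine ⟨by simp [IH1, pvDOf, List.getD], ?_, ?_⟩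
      · dsimp only
        rw [IH2, pvThr_snoc, hm]
        rfl
      · intro t
        dsimp only
        by_cases ht : t = a.2
        · subst ht
          rw [PySem.Dict.get?_insert_self, pvTagMin_append, hm,
            pvTagMin_singleton, if_pos rfl, hd]
          rfl
        · rw [PySem.Dict.get?_insert_of_ne _ _ (by exact ht), IH3 t,
            pvTagMin_append, pvTagMin_singleton, if_neg (fun hh => ht hh.symm),
            pvOMin_none_right]
    | some m =>
      have hc : (if m > pvDOf a.1 then m else pvDOf a.1) = max (pvDOf a.1) m := by
        rcases max_cases (pvDOf a.1) m with ⟨h1, h2⟩ | ⟨h1, h2⟩ <;> rw [h1] <;>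
          split_ifs <;> omega
      refine ⟨by simp [IH1, pvDOf, List.getD], ?_, ?_⟩
      · dsimp only
        rw [pvThr_snoc, hm, ← IH2, hd, hc]
        cases hthr : st.2.1 with
        | none => rfl
        | some tv =>
          dsimp only [pvOMin, Option.map]
          by_cases hlt : max (pvDOf a.1) m < tv
          · rw [if_pos hlt]
            congr 1
            omega
          · rw [if_neg hlt]
            congr 1
            omega
      · intro t
        dsimp only
        by_cases ht : t = a.2
        · subst ht
          rw [pvTagMin_append, hm, pvTagMin_singleton, if_pos rfl]
          by_cases hlt : pvDOf a.1 < m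
          · rw [if_pos (by rw [hd]; exact hlt), PySem.Dict.get?_insert_self]
            dsimp only [pvOMin]
            congr 1
            omega
          · rw [if_neg (by rw [hd]; exact hlt), IH3, hm]
            dsimp only [pvOMin]
            congr 1
            omega
        · rw [pvTagMin_append, pvTagMin_singleton,
            if_neg (c := a.2 = t) (fun hh => ht hh.symm), pvOMin_none_right, ← IH3 t]
          by_cases hlt : pvDOf a.1 < m
          · rw [if_pos (by rw [hd]; exact hlt), PySem.Dict.get?_insert_of_ne _ _ (by exact ht)]
          · rw [if_neg (by rw [hd]; exact hlt)]

-- ---- assembling ----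
theorem pvMain : ∀ (points : List (List Int)) (s : String),
    Pre_maxPointsInsideSquare points s →
    maxPointsInsideSquare points s = maxPointsInsideSquare_alt points s := by
  intro points s hpre
  obtain ⟨hrow, hlen⟩ := hpre
  unfold maxPointsInsideSquare maxPointsInsideSquare_alt
  dsimp only
  set cs := s.toList with hcs
  set plist := (List.range points.length).map (pvPointA points cs) with hplist
  set ls := PySem.List.sorted plist pvDist false with hls
  have hperm : ls.Perm plist := by
    rw [hls]; exact PySem.List.sorted_perm plist pvDist false
  have hpw : ls.Pairwise (fun a b => pvDist a ≤ pvDist b) := by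
    rw [hls]; exact PySem.List.sorted_pairwise plist pvDist
  have hmp : (ls.map pvProj).Pairwise (fun a b => a.1 ≤ b.1) :=
    List.Pairwise.map pvProj (fun a b h => h) hpw
  have hfbthr : pvFb PySem.Set.empty (ls.map pvProj) = pvThr (ls.map pvProj) := by
    rw [show (PySem.Set.empty : List Char) = [] from rfl, pvFb_eq_thr (ls.map pvProj) hmp []]
    simp [pvOMin]
  have hplen : plist.length = points.length := by simp [hplist]
  have hlslen : ls.length = points.length := by
    rw [hperm.length_eq, hplen]
  have hpairs : plist.map pvProj = pvPairs (points.zip cs) := by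
    apply List.ext_getElem
    · simp [pvPairs, hplist, List.length_zip]
      omega
    · intro i h1 h2
      have hip : i < points.length := by simpa [hplist] using h1
      have hic : i < cs.length := lt_of_lt_of_le hip hlen
      simp only [hplist, pvPairs, List.getElem_map, List.getElem_range, List.getElem_zip,
        pvPointA, pvProj, pvDist, pvDOf]
      rw [List.getD_eq_getElem points [] hip, List.getD_eq_getElem cs ' ' hic]
  have hpermp : (ls.map pvProj).Perm (pvPairs (points.zip cs)) := by
    rw [← hpairs]
    exact hperm.map pvProj
  obtain ⟨hB1, hB2, hB3⟩ := pvFoldB (points.zip cs)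
  rw [pvOuterA_eq ls.length ls rfl hpw 0 PySem.Set.empty, hfbthr]
  rw [pvThr_perm hpermp, hB2.symm]
  cases hthr : (List.foldl pvStepB (PySem.Dict.empty, none, []) (points.zip cs)).2.1 with
  | none =>
    dsimp only
    rw [hlslen]
    omega
  | some tv =>
    dsimp only
    rw [hB1, List.filter_map, List.length_map, ← List.countP_eq_length_filter]
    rw [hpermp.countP_eq, zero_add]
    rfl

-- ===== VERDICT (by name: the statement is the Claim_ definition above) =====
theorem maxPointsInsideSquare_spec : Claim_equal_maxPointsInsideSquare := by
  intro points s _ hpre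
  exact pvMain points s hpre
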